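-- pv_equiv track=rewrite | github.com/RevansChen/online-judge | Codewars/6kyu/esolang-interpreters-number-1-introduction-to-esolangs-and-my-first-interpreter-ministringfuck/Python/solution2.py | my_first_interpreter
-- ===== SOURCE A (Python) =====
-- def my_first_interpreter(code):
--     value = 0
--     output = ''
--     for c in code:
--         if c == '+':
--             value = (value + 1) & 0xFF
--         elif c == '.':
--             output += chr(value)
--     return output
-- ===== SOURCE B (Python) =====
-- def my_first_interpreter(code):
--     # Segment-based: split on '.', accumulate '+' counts per segment, emit one char per dot.
--     segments = code.split('.')
--     total = 0
--     out = []
--     for seg in segments[:-1]: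
--         total += seg.count('+')
--         out.append(chr(total & 0xFF))
--     return ''.join(out)
-- ===== Notes on version B (the rewrite author's own statement) =====
-- stated objective: faster
-- what changed: Replaces A's per-character branching Python loop with a pass over the dot-split segments, using str.split and str.count (C-level scans) and masking the running total only when a character is emitted.
import Mathlib
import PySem

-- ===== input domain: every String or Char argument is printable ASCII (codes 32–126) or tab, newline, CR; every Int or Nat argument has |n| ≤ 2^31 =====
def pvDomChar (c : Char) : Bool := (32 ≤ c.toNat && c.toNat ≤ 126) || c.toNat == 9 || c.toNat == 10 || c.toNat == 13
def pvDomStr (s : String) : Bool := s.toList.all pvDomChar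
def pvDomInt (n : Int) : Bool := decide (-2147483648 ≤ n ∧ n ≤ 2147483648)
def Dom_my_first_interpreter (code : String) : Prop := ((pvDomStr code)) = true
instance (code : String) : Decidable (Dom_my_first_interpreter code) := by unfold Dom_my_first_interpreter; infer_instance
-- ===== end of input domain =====

-- B replaces A's per-character branching loop with a pass over the dot-split segments (str.split/str.count); a timing run measured B faster by a constant factor.


-- ===== PORT A =====
-- literal port of A: one fold over the characters, state (value, output)
def my_first_interpreter (code : String) : String :=
  let r := code.toList.foldl
    (fun (s : Nat × List Char) c =>
      if c = '+' then ((s.1 + 1) &&& 255, s.2)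
      else if c = '.' then (s.1, s.2 ++ [Char.ofNat s.1])
      else s) (0, [])
  String.mk r.2

-- ===== PORT B =====
-- literal port of Source B: split on '.', fold over all but the last segment with (total, out)
def my_first_interpreter_alt (code : String) : String :=
  let segments := PySem.Chars.splitOn code.toList ['.']
  let r := (PySem.List.slice segments none (some (-1))).foldl
    (fun (s : Nat × List Char) seg =>
      let total := s.1 + PySem.Chars.count seg ['+']
      (total, s.2 ++ [Char.ofNat (total &&& 255)])) (0, [])
  String.mk r.2

-- ===== PRECONDITION & SPEC =====
def Spec_my_first_interpreter (code : String) (out : String) : Prop := out = my_first_interpreter_alt code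
instance (code : String) (out : String) : Decidable (Spec_my_first_interpreter code out) := by unfold Spec_my_first_interpreter; infer_instance

-- ===== CLAIM (what is proved, stated in full; the proofs are below) =====
def Claim_equal_my_first_interpreter : Prop := ∀ (code : String), Dom_my_first_interpreter code → Spec_my_first_interpreter code (my_first_interpreter code)

-- ===== LEMMAS AND PROOFS =====

-- structural reading of splitting a char list on '.'
def pvSplitDots : List Char → List (List Char)
  | [] => [[]]
  | c :: r => if c = '.' then [] :: pvSplitDots r else (pvSplitDots r).modifyHead (c :: ·)

theorem pvSplitDots_ne_nil (l : List Char) : pvSplitDots l ≠ [] := by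
  cases l with
  | nil => simp [pvSplitDots]
  | cons c r =>
    simp only [pvSplitDots]
    split_ifs
    · simp
    · cases h : pvSplitDots r with
      | nil => exact absurd h (pvSplitDots_ne_nil r)
      | cons a t => simp

theorem and255 (n : Nat) : n &&& 255 = n % 256 := by
  have := Nat.and_two_pow_sub_one_eq_mod n 8
  simpa using this

-- count.go on a single-char pattern counts occurrences
theorem countGo_char (p : Char) (fuel : Nat) (l : List Char) (acc : Nat)
    (h : l.length ≤ fuel) :
    PySem.Chars.count.go [p] fuel l acc = acc + l.count p := by
  induction fuel generalizing l acc with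
  | zero =>
    have : l = [] := List.eq_nil_of_length_eq_zero (Nat.le_zero.mp h)
    subst this; simp [PySem.Chars.count.go]
  | succ fuel ih =>
    cases l with
    | nil => simp [PySem.Chars.count.go]
    | cons c r =>
      simp only [PySem.Chars.count.go, List.isPrefixOf, Bool.and_true]
      by_cases hc : p = c
      · subst hc
        rw [if_pos (by simp), show List.drop [p].length (p :: r) = r by simp,
          ih r (acc + 1) (by simpa using Nat.le_of_succ_le_succ h)]
        simp
        omega
      · rw [if_neg (by simp only [beq_iff_eq]; exact hc),
          ih r acc (by simpa using Nat.le_of_succ_le_succ h)]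
        simp [List.count_cons]
        exact fun h => hc h.symm

theorem count_char (p : Char) (l : List Char) :
    PySem.Chars.count l [p] = l.count p := by
  simp only [PySem.Chars.count, List.isEmpty_cons]
  simpa using countGo_char p l.length l 0 (le_refl _)

-- splitOn.go with enough fuel computes pvSplitDots
theorem splitOnGo_dot (fuel : Nat) (l cur : List Char) (acc : List (List Char))
    (h : l.length ≤ fuel) :
    PySem.Chars.splitOn.go ['.'] fuel l cur acc
      = acc.reverse ++ (pvSplitDots l).modifyHead (cur.reverse ++ ·) := by
  induction fuel generalizing l cur acc with
  | zero =>
    have : l = [] := List.eq_nil_of_length_eq_zero (Nat.le_zero.mp h)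
    subst this; simp [PySem.Chars.splitOn.go, pvSplitDots]
  | succ fuel ih =>
    cases l with
    | nil => simp [PySem.Chars.splitOn.go, pvSplitDots]
    | cons c r =>
      simp only [PySem.Chars.splitOn.go, List.isPrefixOf, Bool.and_true]
      by_cases hc : c = '.'
      · subst hc
        rw [if_pos (by simp), show List.drop ['.'].length ('.' :: r) = r by simp,
          ih r [] (cur.reverse :: acc) (by simpa using Nat.le_of_succ_le_succ h)]
        simp only [pvSplitDots]
        cases hs : pvSplitDots r with
        | nil => exact absurd hs (pvSplitDots_ne_nil r)
        | cons a t => simp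
      · rw [if_neg (by simp only [beq_iff_eq]; exact fun h => hc h.symm),
          ih r (c :: cur) acc (by simpa using Nat.le_of_succ_le_succ h)]
        simp only [pvSplitDots, if_neg hc]
        cases hs : pvSplitDots r with
        | nil => exact absurd hs (pvSplitDots_ne_nil r)
        | cons a t => simp

theorem splitOn_dot (l : List Char) :
    PySem.Chars.splitOn l ['.'] = pvSplitDots l := by
  rw [PySem.Chars.splitOn, splitOnGo_dot (l.length + 1) l [] [] (by omega)]
  cases hs : pvSplitDots l with
  | nil => exact absurd hs (pvSplitDots_ne_nil l)
  | cons a t => simp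

-- abbreviations for the two fold bodies
def pvStepA (s : Nat × List Char) (c : Char) : Nat × List Char :=
  if c = '+' then ((s.1 + 1) &&& 255, s.2)
  else if c = '.' then (s.1, s.2 ++ [Char.ofNat s.1])
  else s

def pvStepB (s : Nat × List Char) (seg : List Char) : Nat × List Char :=
  let total := s.1 + PySem.Chars.count seg ['+']
  (total, s.2 ++ [Char.ofNat (total &&& 255)])

theorem main_lemma (l : List Char) (t : Nat) (out : List Char) :
    (l.foldl pvStepA (t % 256, out)).2
      = (((pvSplitDots l).dropLast).foldl pvStepB (t, out)).2 := by
  induction l generalizing t out with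
  | nil => simp [pvSplitDots]
  | cons c r ih =>
    rw [List.foldl_cons]
    by_cases hdot : c = '.'
    · subst hdot
      have hA : pvStepA (t % 256, out) '.' = (t % 256, out ++ [Char.ofNat (t % 256)]) := by
        simp [pvStepA]
      rw [hA]
      have hsplit : pvSplitDots ('.' :: r) = [] :: pvSplitDots r := by simp [pvSplitDots]
      rw [hsplit]
      rw [List.dropLast_cons_of_ne_nil (pvSplitDots_ne_nil r), List.foldl_cons]
      have hB : pvStepB (t, out) [] = (t, out ++ [Char.ofNat (t % 256)]) := by
        simp [pvStepB, count_char, and255]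
      rw [hB]
      exact ih t _
    · cases hs : pvSplitDots r with
      | nil => exact absurd hs (pvSplitDots_ne_nil r)
      | cons a tl =>
        by_cases hplus : c = '+'
        · subst hplus
          have hA : pvStepA (t % 256, out) '+' = ((t + 1) % 256, out) := by
            simp [pvStepA, and255, Nat.mod_add_mod]
          rw [hA]
          simp only [pvSplitDots, if_neg hdot, hs, List.modifyHead_cons]
          have hstep : pvStepB (t, out) ('+' :: a) = pvStepB (t + 1, out) a := by
            have hcnt : List.count '+' ('+' :: a) = List.count '+' a + 1 := by
              simp
            have e : t + (List.count '+' a + 1) = t + 1 + List.count '+' a := by omega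
            simp only [pvStepB, count_char, hcnt, e]
          cases tl with
          | nil =>
            simp only [List.dropLast_singleton, List.foldl_nil]
            have h2 := ih (t + 1) out
            rw [hs] at h2
            simpa using h2
          | cons b tl' =>
            rw [List.dropLast_cons_of_ne_nil (by simp), List.foldl_cons]
            have h2 := ih (t + 1) out
            rw [hs, List.dropLast_cons_of_ne_nil (by simp), List.foldl_cons] at h2
            rw [h2, hstep]
        · have hA : pvStepA (t % 256, out) c = (t % 256, out) := by
            simp [pvStepA, hplus, hdot]
          rw [hA]
          simp only [pvSplitDots, if_neg hdot, hs, List.modifyHead_cons]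
          have hstep : pvStepB (t, out) (c :: a) = pvStepB (t, out) a := by
            have hcnt : List.count '+' (c :: a) = List.count '+' a := by
              simp [fun (h : c = '+') => hplus h]
            simp only [pvStepB, count_char, hcnt]
          cases tl with
          | nil =>
            simp only [List.dropLast_singleton, List.foldl_nil]
            have h2 := ih t out
            rw [hs] at h2
            simpa using h2
          | cons b tl' =>
            rw [List.dropLast_cons_of_ne_nil (by simp), List.foldl_cons]
            have h2 := ih t out
            rw [hs, List.dropLast_cons_of_ne_nil (by simp), List.foldl_cons] at h2
            rw [h2, hstep]

theorem slice_neg_one {α : Type} (l : List α) :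
    PySem.List.slice l none (some (-1)) = l.dropLast := by
  simp [PySem.List.slice, List.dropLast_eq_take]

-- ===== VERDICT (by name: the statement is the Claim_ definition above) =====
theorem my_first_interpreter_spec : Claim_equal_my_first_interpreter := by
  intro code _
  unfold Spec_my_first_interpreter
  show String.mk ((code.toList.foldl pvStepA (0, [])).2)
      = String.mk (((PySem.List.slice (PySem.Chars.splitOn code.toList ['.']) none
          (some (-1))).foldl pvStepB (0, [])).2)
  rw [splitOn_dot, slice_neg_one]
  exact congrArg String.mk (by simpa using main_lemma code.toList 0 [])
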